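-- pv_equiv track=rewrite | github.com/riyanardyanto/daily_report | src/services/spa_processor.py | process_data_spa
-- ===== SOURCE A (Python) =====
-- SpaTable = list[list[str]]
--
-- def _cell(row: list[str] | None, idx: int) -> str:
--     if row is None:
--         return ""
--     if idx < 0 or idx >= len(row):
--         return ""
--     try:
--         return str(row[idx] or "")
--     except Exception:
--         return ""
--
-- def process_data_spa(spa_df: SpaTable) -> list[SpaTable]:
--     def _is_marker(row: list[str]) -> bool:
--         for col_i in (6, 7, 8, 9):
--             v = _cell(row, col_i).strip()
--             if v == "i":
--                 return True
--         return False
--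
--     # Remove rows where both col 3 and col 13 are empty,
--     # but keep marker rows so splitting still works.
--     filtered: SpaTable = []
--     for row in spa_df or []:
--         c3 = _cell(row, 3).strip()
--         c13 = _cell(row, 13).strip()
--         if (c3 == "" and c13 == "") and not _is_marker(row):
--             continue
--         filtered.append(row)
--
--     # Optional: blank out col 0 and col 2 (just index columns)
--     for row in filtered:
--         if len(row) > 0:
--             row[0] = ""
--         if len(row) > 2:
--             row[2] = ""
--
--     # split table menjadi beberapa table berdasarkan index baris yang memiliki nilai 'i'
--     split_indices: list[int] = []
--     for i, row in enumerate(filtered):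
--         if _is_marker(row):
--             split_indices.append(i)
--
--     split_tables: list[SpaTable] = []
--     prev_index = 0
--     for index in split_indices:
--         if index == prev_index:
--             continue
--         split_tables.append(filtered[prev_index:index])
--         prev_index = index
--     split_tables.append(filtered[prev_index:])
--
--     return split_tables
-- ===== SOURCE B (Python) =====
-- SpaTable = list[list[str]]
--
-- def _cell(row: list[str] | None, idx: int) -> str:
--     if row is None:
--         return ""
--     if idx < 0 or idx >= len(row):
--         return ""
--     try:
--         return str(row[idx] or "")
--     except Exception:
--         return ""
--
-- def process_data_spa(spa_df: SpaTable) -> list[SpaTable]: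
--     def _is_marker(row: list[str]) -> bool:
--         return any(_cell(row, i).strip() == "i" for i in (6, 7, 8, 9))
--
--     tables: list[SpaTable] = []
--     current: SpaTable = []
--     for row in (spa_df or []):
--         marker = _is_marker(row)
--         if _cell(row, 3).strip() == "" and _cell(row, 13).strip() == "" and not marker:
--             continue
--         if len(row) > 0:
--             row[0] = ""
--         if len(row) > 2:
--             row[2] = ""
--         if marker and current:
--             tables.append(current)
--             current = []
--         current.append(row)
--     tables.append(current)
--     return tables
-- ===== Notes on version B (the rewrite author's own statement) =====
-- stated objective: simpler
-- what changed: B replaces A's four separate passes (filter, blank, collect split indices, slice between indices) by a single pass that maintains a running current segment, cutting before each marker row with a non-empty current segment.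
import Mathlib
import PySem

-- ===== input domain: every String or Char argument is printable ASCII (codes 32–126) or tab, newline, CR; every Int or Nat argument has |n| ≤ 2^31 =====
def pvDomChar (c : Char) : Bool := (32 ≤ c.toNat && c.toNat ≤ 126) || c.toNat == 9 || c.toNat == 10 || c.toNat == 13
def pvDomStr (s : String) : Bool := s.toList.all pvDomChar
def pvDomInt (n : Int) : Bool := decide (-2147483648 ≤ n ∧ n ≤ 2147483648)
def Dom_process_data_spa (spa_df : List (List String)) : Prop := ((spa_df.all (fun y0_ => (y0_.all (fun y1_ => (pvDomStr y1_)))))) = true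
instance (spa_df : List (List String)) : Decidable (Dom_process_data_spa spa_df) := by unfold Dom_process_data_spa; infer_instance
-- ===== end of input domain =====

-- B does the same job in one pass (running segment) instead of A's four passes; same return
-- value, and both Pythons perform the same in-place blanking of columns 0 and 2 of the kept rows
-- (the theorems are about the return value).

-- ===== PORT A =====
-- shared helper: Python module-level _cell (row elements are str, so `row[idx] or ""` is the
-- element itself, "" when it is ""; exact)
def pvCell (row : List String) (idx : Int) : String :=
  if idx < 0 ∨ (row.length : Int) ≤ idx then "" else (PySem.List.pyGet? row idx).getD ""

-- _is_marker: early-returning for-loop over (6,7,8,9) = List.any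
def pvIsMarker (row : List String) : Bool :=
  [(6 : Int), 7, 8, 9].any (fun i => PySem.Str.strip (pvCell row i) == "i")

-- the filtering test of both Pythons: keep the row unless col3 and col13 are blank and no marker
def pvKeep (row : List String) : Bool :=
  !(PySem.Str.strip (pvCell row 3) == "" && PySem.Str.strip (pvCell row 13) == ""
      && !pvIsMarker row)

-- the in-place blanking of row[0] and row[2] (guarded by len(row))
def pvBlank (row : List String) : List String :=
  let row1 := if 0 < row.length then row.set 0 "" else row
  if 2 < row1.length then row1.set 2 "" else row1

-- A's first loop: build `filtered` by appending kept rows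
def pvFilterLoop (acc : List (List String)) : List (List String) → List (List String)
  | [] => acc
  | row :: rest =>
    if pvKeep row then pvFilterLoop (acc ++ [row]) rest else pvFilterLoop acc rest

-- A's third loop: enumerate(filtered), collect indices of marker rows
def pvIdxLoop (i : Int) (acc : List Int) : List (List String) → List Int
  | [] => acc
  | row :: rest => pvIdxLoop (i + 1) (if pvIsMarker row then acc ++ [i] else acc) rest

-- A's fourth loop over split_indices with state (split_tables, prev_index)
def pvSplitLoop (f : List (List String)) :
    List Int → List (List (List String)) → Int → (List (List (List String)) × Int)
  | [], tables, prev => (tables, prev)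
  | idx :: rest, tables, prev =>
    if idx = prev then pvSplitLoop f rest tables prev
    else pvSplitLoop f rest (tables ++ [PySem.List.slice f (some prev) (some idx)]) idx

def process_data_spa (spa_df : List (List String)) : List (List (List String)) :=
  let filtered := pvFilterLoop [] spa_df
  -- second loop: in-place blanking of each filtered row
  let filtered := filtered.map pvBlank
  let idxs := pvIdxLoop 0 [] filtered
  let st := pvSplitLoop filtered idxs [] 0
  st.1 ++ [PySem.List.slice filtered (some st.2) none]

-- ===== PORT B =====
-- B's single loop: state (tables, current running segment)
def pvSegLoop :
    List (List String) → (List (List (List String)) × List (List String)) →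
      (List (List (List String)) × List (List String))
  | [], st => st
  | row :: rest, (tables, current) =>
    if pvKeep row then
      let row' := pvBlank row
      if pvIsMarker row && !current.isEmpty then pvSegLoop rest (tables ++ [current], [row'])
      else pvSegLoop rest (tables, current ++ [row'])
    else pvSegLoop rest (tables, current)

def process_data_spa_alt (spa_df : List (List String)) : List (List (List String)) :=
  let st := pvSegLoop spa_df ([], [])
  st.1 ++ [st.2]

-- ===== PRECONDITION & SPEC =====
def Spec_process_data_spa (spa_df : List (List String)) (out : List (List (List String))) : Prop := out = process_data_spa_alt spa_df
instance (spa_df : List (List String)) (out : List (List (List String))) : Decidable (Spec_process_data_spa spa_df out) := by unfold Spec_process_data_spa; infer_instance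

-- ===== CLAIM (what is proved, stated in full; the proofs are below) =====
def Claim_equal_process_data_spa : Prop := ∀ (spa_df : List (List String)), Dom_process_data_spa spa_df → Spec_process_data_spa spa_df (process_data_spa spa_df)

-- ===== LEMMAS AND PROOFS =====

-- proof-side view of B's loop: the segmentation of the filtered+blanked list
def cutSplit (acc : List (List String)) : List (List String) → List (List (List String))
  | [] => [acc]
  | r :: g => if pvIsMarker r && !acc.isEmpty then acc :: cutSplit [r] g else cutSplit (acc ++ [r]) g

-- proof-side view of A's index pass: positions of the marker rows
def markerIdxs : List (List String) → List Nat
  | [] => []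
  | r :: g => (if pvIsMarker r then [0] else []) ++ (markerIdxs g).map (· + 1)

-- proof-side view of A's slicing pass, over Nat indices with take/drop slices
def sliceFold (f : List (List String)) : List Nat → Nat → List (List (List String)) → List (List (List String))
  | [], prev, tables => tables ++ [f.drop prev]
  | i :: is, prev, tables =>
    if i = prev then sliceFold f is prev tables
    else sliceFold f is i (tables ++ [(f.drop prev).take (i - prev)])

theorem pvBlank_length (row : List String) : (pvBlank row).length = row.length := by
  simp only [pvBlank]
  split_ifs <;> simp

theorem pvBlank_getElem? (row : List String) (n : Nat) (h : 3 ≤ n) :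
    (pvBlank row)[n]? = row[n]? := by
  simp only [pvBlank]
  split_ifs <;>
    simp [List.getElem?_set_ne (show (0:Nat) ≠ n by omega),
          List.getElem?_set_ne (show (2:Nat) ≠ n by omega)]

theorem pvCell_blank (row : List String) (i : Int) (h : 3 ≤ i) :
    pvCell (pvBlank row) i = pvCell row i := by
  unfold pvCell
  rw [pvBlank_length]
  split_ifs with h1
  · rfl
  · rw [not_or, Int.not_lt, Int.not_le] at h1
    obtain ⟨h2, h3⟩ := h1
    have hi : i = (i.toNat : Int) := by omega
    rw [hi, PySem.List.pyGet?_natCast, PySem.List.pyGet?_natCast,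
        pvBlank_getElem? row i.toNat (by omega)]

theorem pvIsMarker_blank (row : List String) : pvIsMarker (pvBlank row) = pvIsMarker row := by
  simp only [pvIsMarker, List.any_cons, List.any_nil]
  rw [pvCell_blank row 6 (by norm_num), pvCell_blank row 7 (by norm_num),
      pvCell_blank row 8 (by norm_num), pvCell_blank row 9 (by norm_num)]

theorem pvFilterLoop_eq (rows : List (List String)) :
    ∀ acc, pvFilterLoop acc rows = acc ++ rows.filter pvKeep := by
  induction rows with
  | nil => intro acc; simp [pvFilterLoop]
  | cons r g ih =>
    intro acc
    by_cases h : pvKeep r <;> simp [pvFilterLoop, h, ih]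

theorem pvIdxLoop_eq (g : List (List String)) :
    ∀ (i : Int) (acc : List Int),
      pvIdxLoop i acc g = acc ++ (markerIdxs g).map (fun n : Nat => i + (n : Int)) := by
  induction g with
  | nil => intro i acc; simp [pvIdxLoop, markerIdxs]
  | cons r g ih =>
    intro i acc
    have hmap : ((markerIdxs g).map (· + 1)).map (fun n : Nat => i + (n : Int))
        = (markerIdxs g).map (fun n : Nat => (i + 1) + (n : Int)) := by
      rw [List.map_map]
      apply List.map_eq_map_iff.mpr
      intro n _
      simp only [Function.comp_apply]
      push_cast
      ring
    by_cases h : pvIsMarker r <;>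
      simp [pvIdxLoop, markerIdxs, h, ih, hmap, List.append_assoc]

theorem pvSplitLoop_eq (f : List (List String)) (is : List Nat) :
    ∀ (p : Nat) (tables : List (List (List String))),
      (pvSplitLoop f (is.map (fun n : Nat => (n : Int))) tables (p : Int)).1
        ++ [PySem.List.slice f
              (some ((pvSplitLoop f (is.map (fun n : Nat => (n : Int))) tables (p : Int)).2)) none]
      = sliceFold f is p tables := by
  induction is with
  | nil =>
    intro p tables
    simp [pvSplitLoop, sliceFold, PySem.List.slice_from_natCast]
  | cons i is ih =>
    intro p tables
    simp only [List.map_cons, pvSplitLoop]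
    by_cases h : i = p
    · subst h
      rw [if_pos rfl]
      rw [ih]
      simp [sliceFold]
    · have hne : ¬((i : Int) = (p : Int)) := by exact_mod_cast h
      rw [if_neg hne, PySem.List.slice_natCast, ih]
      simp [sliceFold, h]

theorem sliceFold_shift (a h : List (List String)) (is : List Nat) :
    ∀ (p : Nat) (tables : List (List (List String))),
      sliceFold (a ++ h) (is.map (· + a.length)) (p + a.length) tables
        = sliceFold h is p tables := by
  induction is with
  | nil =>
    intro p tables
    simp only [List.map_nil, sliceFold]
    rw [Nat.add_comm p a.length, List.drop_length_add_append]
  | cons i is ih =>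
    intro p tables
    simp only [List.map_cons, sliceFold]
    by_cases hip : i = p
    · subst hip
      rw [if_pos rfl, if_pos rfl, ih]
    · rw [if_neg (by omega), if_neg hip]
      rw [Nat.add_comm p a.length, List.drop_length_add_append]
      have h2 : i + a.length - (a.length + p) = i - p := by omega
      rw [h2, ih]

theorem cutSplit_eq_sliceFold (g : List (List String)) :
    ∀ (acc : List (List String)) (tables : List (List (List String))), acc ≠ [] →
      tables ++ cutSplit acc g
        = sliceFold (acc ++ g) ((markerIdxs g).map (· + acc.length)) 0 tables := by
  induction g with
  | nil =>
    intro acc tables hacc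
    simp [cutSplit, markerIdxs, sliceFold]
  | cons r g ih =>
    intro acc tables hacc
    have hie : acc.isEmpty = false := List.isEmpty_eq_false_iff.mpr hacc
    by_cases hm : pvIsMarker r
    · have hcond : (pvIsMarker r && !acc.isEmpty) = true := by simp [hm, hie]
      rw [cutSplit, if_pos hcond]
      simp only [markerIdxs, if_pos hm, List.singleton_append, List.map_cons, Nat.zero_add]
      rw [sliceFold]
      rw [if_neg (by simp [List.length_eq_zero_iff, hacc] : ¬ acc.length = 0)]
      rw [List.drop_zero, Nat.sub_zero, List.take_left]
      have hshift := sliceFold_shift acc (r :: g) ((markerIdxs g).map (· + 1)) 0 (tables ++ [acc])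
      rw [Nat.zero_add] at hshift
      rw [hshift]
      have hIH := ih [r] (tables ++ [acc]) (by simp)
      simp only [List.singleton_append, List.length_singleton] at hIH
      rw [← hIH]
      simp
    · have hcond : (pvIsMarker r && !acc.isEmpty) = false := by simp [hm]
      rw [cutSplit, if_neg (by simp [hcond])]
      have hIH := ih (acc ++ [r]) tables (by simp)
      rw [hIH]
      have hlist : (acc ++ [r]) ++ g = acc ++ r :: g := by simp
      have hidx : (markerIdxs g).map (· + (acc ++ [r]).length)
          = (markerIdxs (r :: g)).map (· + acc.length) := by
        simp only [markerIdxs, if_neg hm, List.nil_append, List.map_map,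
          List.length_append, List.length_singleton]
        apply List.map_eq_map_iff.mpr
        intro n _
        simp only [Function.comp_apply]
        omega
      rw [hlist, hidx]

theorem sliceFold_eq_cutSplit (f : List (List String)) :
    sliceFold f (markerIdxs f) 0 [] = cutSplit [] f := by
  cases f with
  | nil => simp [sliceFold, markerIdxs, cutSplit]
  | cons r g =>
    have key : sliceFold (r :: g) ((markerIdxs g).map (· + 1)) 0 [] = cutSplit [r] g := by
      have h := cutSplit_eq_sliceFold g [r] [] (by simp)
      simp only [List.nil_append, List.singleton_append, List.length_singleton] at h
      exact h.symm
    have hright : cutSplit [] (r :: g) = cutSplit [r] g := by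
      rw [cutSplit]
      simp
    rw [hright]
    by_cases hm : pvIsMarker r
    · simp only [markerIdxs, if_pos hm, List.singleton_append]
      rw [sliceFold, if_pos rfl]
      exact key
    · simp only [markerIdxs, if_neg hm, List.nil_append]
      exact key

theorem process_data_spa_eq_cutSplit (spa_df : List (List String)) :
    process_data_spa spa_df = cutSplit [] ((spa_df.filter pvKeep).map pvBlank) := by
  unfold process_data_spa
  rw [pvFilterLoop_eq]
  simp only [List.nil_append]
  rw [pvIdxLoop_eq]
  simp only [List.nil_append]
  have hmap : (markerIdxs ((spa_df.filter pvKeep).map pvBlank)).map (fun n : Nat => (0 : Int) + (n : Int))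
      = (markerIdxs ((spa_df.filter pvKeep).map pvBlank)).map (fun n : Nat => (n : Int)) := by
    apply List.map_eq_map_iff.mpr
    intro n _
    ring
  rw [hmap]
  have h0 : (0 : Int) = ((0 : Nat) : Int) := rfl
  rw [h0, pvSplitLoop_eq]
  exact sliceFold_eq_cutSplit _

theorem pvSegLoop_eq (rows : List (List String)) :
    ∀ (tables : List (List (List String))) (cur : List (List String)),
      (pvSegLoop rows (tables, cur)).1 ++ [(pvSegLoop rows (tables, cur)).2]
        = tables ++ cutSplit cur ((rows.filter pvKeep).map pvBlank) := by
  induction rows with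
  | nil => intro tables cur; simp [pvSegLoop, cutSplit]
  | cons row rest ih =>
    intro tables cur
    by_cases hk : pvKeep row
    · rw [pvSegLoop]
      rw [if_pos hk]
      have hfilter : ((row :: rest).filter pvKeep).map pvBlank
          = pvBlank row :: (rest.filter pvKeep).map pvBlank := by
        simp [hk]
      rw [hfilter, cutSplit, pvIsMarker_blank]
      by_cases hc : (pvIsMarker row && !cur.isEmpty) = true
      · rw [if_pos hc, if_pos hc, ih]
        simp
      · rw [if_neg hc, if_neg hc, ih]
    · rw [pvSegLoop, if_neg hk]
      have hfilter : ((row :: rest).filter pvKeep).map pvBlank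
          = (rest.filter pvKeep).map pvBlank := by
        simp [hk]
      rw [hfilter, ih]

-- ===== VERDICT (by name: the statement is the Claim_ definition above) =====
theorem process_data_spa_spec : Claim_equal_process_data_spa := by
  intro spa_df _
  unfold Spec_process_data_spa
  rw [process_data_spa_eq_cutSplit]
  unfold process_data_spa_alt
  rw [pvSegLoop_eq]
  simp
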